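-- pv_equiv track=rewrite | github.com/logysnail/PhyloScripts | GBsequenceOperation/Readgb.py | divide_gb
-- ===== SOURCE A (Python) =====
-- def divide_gb(gb_lines):
--     """每条记录作为元素形成列表"""
--     record_list = []
--     record = []
--     for line in gb_lines:
--         if line == "//":
--             record_list.append(record)
--             record = []
--         else:
--             record.append(line)
--     return record_list
-- ===== SOURCE B (Python) =====
-- def divide_gb(gb_lines):
--     """每条记录作为元素形成列表"""
--     lines = list(gb_lines)
--     result = []
--     while True:
--         try:
--             i = lines.index("//")
--         except ValueError:
--             return result
--         result.append(lines[:i])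
--         lines = lines[i + 1:]
-- ===== Notes on version B (the rewrite author's own statement) =====
-- stated objective: alternative
-- what changed: B repeatedly locates the next '//' with list.index and slices a whole record out at once, instead of A's line-by-line accumulator loop; trailing lines after the last '//' are dropped in both.
import Mathlib
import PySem

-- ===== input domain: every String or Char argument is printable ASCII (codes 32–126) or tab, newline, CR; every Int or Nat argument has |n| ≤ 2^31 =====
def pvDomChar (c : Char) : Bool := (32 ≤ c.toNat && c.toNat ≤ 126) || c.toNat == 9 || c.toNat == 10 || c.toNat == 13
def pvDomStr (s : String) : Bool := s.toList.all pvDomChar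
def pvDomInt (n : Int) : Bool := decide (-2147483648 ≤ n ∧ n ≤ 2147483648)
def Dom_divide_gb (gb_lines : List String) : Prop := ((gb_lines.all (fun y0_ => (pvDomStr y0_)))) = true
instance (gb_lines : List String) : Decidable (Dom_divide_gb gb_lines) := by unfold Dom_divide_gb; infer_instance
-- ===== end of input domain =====

-- B replaces A's line-by-line accumulator loop by repeatedly locating the next "//" with
-- list.index and slicing a whole record out at once (objective: alternative decomposition).

-- ===== PORT A =====
-- A: one pass, appending each non-"//" line to the current record, flushing on "//".
def divide_gb (gb_lines : List String) : List (List String) :=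
  (gb_lines.foldl
    (fun (s : List (List String) × List String) line =>
      if line == "//" then (s.1 ++ [s.2], [])
      else (s.1, s.2 ++ [line]))
    ([], [])).1

-- ===== PORT B =====
-- B's while loop: find next "//" (none = ValueError → return result), slice the record out.
def divideGbGo (lines : List String) (result : List (List String)) : List (List String) :=
  match h : PySem.List.index? lines "//" with
  | none => result
  | some i =>
      divideGbGo (PySem.List.slice lines (some ((i + 1 : Nat) : Int)) none)
                 (result ++ [PySem.List.slice lines none (some ((i : Nat) : Int))])
termination_by lines.length
decreasing_by
  obtain ⟨hk, -, -⟩ := PySem.List.getElem_of_index?_eq_some h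
  rw [PySem.List.slice_from_natCast]
  simp only [List.length_drop]
  omega

def divide_gb_alt (gb_lines : List String) : List (List String) :=
  divideGbGo gb_lines []

-- ===== PRECONDITION & SPEC =====
def Spec_divide_gb (gb_lines : List String) (out : List (List String)) : Prop := out = divide_gb_alt gb_lines
instance (gb_lines : List String) (out : List (List String)) : Decidable (Spec_divide_gb gb_lines out) := by unfold Spec_divide_gb; infer_instance

-- ===== CLAIM (what is proved, stated in full; the proofs are below) =====
def Claim_equal_divide_gb : Prop := ∀ (gb_lines : List String), Dom_divide_gb gb_lines → Spec_divide_gb gb_lines (divide_gb gb_lines)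

-- ===== LEMMAS AND PROOFS =====

-- prepend cur to the first record, if any (empty result stays empty)
def gHelp (cur : List String) : List (List String) → List (List String)
  | [] => []
  | r :: rs => (cur ++ r) :: rs

theorem gHelp_nil (r : List (List String)) : gHelp [] r = r := by
  cases r <;> simp [gHelp]

theorem gHelp_comp (cur : List String) (l : String) (r : List (List String)) :
    gHelp (cur ++ [l]) r = gHelp cur (gHelp [l] r) := by
  cases r <;> simp [gHelp]

theorem divideGbGo_eq_some (lines : List String) (result : List (List String)) {i : Nat}
    (h : PySem.List.index? lines "//" = some i) :
    divideGbGo lines result =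
      divideGbGo (PySem.List.slice lines (some ((i + 1 : Nat) : Int)) none)
                 (result ++ [PySem.List.slice lines none (some ((i : Nat) : Int))]) := by
  rw [divideGbGo.eq_def]
  split
  · simp_all
  · rename_i j heq
    rw [h] at heq
    injection heq with heq; subst heq
    rfl

theorem divideGbGo_eq_none (lines : List String) (result : List (List String))
    (h : PySem.List.index? lines "//" = none) :
    divideGbGo lines result = result := by
  rw [divideGbGo.eq_def]
  split
  · rfl
  · rename_i j heq
    rw [h] at heq
    cases heq

theorem divideGbGo_nil (result : List (List String)) : divideGbGo [] result = result :=
  divideGbGo_eq_none _ _ (by simp)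

theorem divideGbGo_acc (n : Nat) (lines : List String) (hn : lines.length ≤ n)
    (result : List (List String)) :
    divideGbGo lines result = result ++ divideGbGo lines [] := by
  induction n generalizing lines result with
  | zero =>
    have : lines = [] := List.length_eq_zero_iff.mp (Nat.le_zero.mp hn)
    subst this
    simp [divideGbGo_nil]
  | succ n ih =>
    cases h : PySem.List.index? lines "//" with
    | none => rw [divideGbGo_eq_none _ _ h, divideGbGo_eq_none _ _ h]; simp
    | some i =>
      obtain ⟨hk, -, -⟩ := PySem.List.getElem_of_index?_eq_some h
      have hlen : (PySem.List.slice lines (some ((i + 1 : Nat) : Int)) none).length ≤ n := by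
        rw [PySem.List.slice_from_natCast]
        simp only [List.length_drop]
        omega
      rw [divideGbGo_eq_some _ _ h, divideGbGo_eq_some _ _ h, ih _ hlen, ih _ hlen ([] ++ _)]
      simp

theorem divideGbGo_cons_hit (ls : List String) :
    divideGbGo ("//" :: ls) [] = [] :: divideGbGo ls [] := by
  have h : PySem.List.index? ("//" :: ls) "//" = some 0 := PySem.List.index?_cons_self _ _
  rw [divideGbGo_eq_some _ _ h, PySem.List.slice_from_natCast, PySem.List.slice_to_natCast]
  simp only [List.drop_succ_cons, List.drop_zero, List.take_zero, List.nil_append]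
  rw [divideGbGo_acc ls.length ls le_rfl]
  rfl

theorem divideGbGo_cons_miss (l : String) (ls : List String) (hne : l ≠ "//") :
    divideGbGo (l :: ls) [] = gHelp [l] (divideGbGo ls []) := by
  have h : PySem.List.index? (l :: ls) "//" = (PySem.List.index? ls "//").map (· + 1) :=
    PySem.List.index?_cons_of_ne _ hne
  cases h2 : PySem.List.index? ls "//" with
  | none =>
    have h3 : PySem.List.index? (l :: ls) "//" = none := by rw [h, h2]; rfl
    rw [divideGbGo_eq_none _ _ h3, divideGbGo_eq_none _ _ h2]
    rfl
  | some i =>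
    have h3 : PySem.List.index? (l :: ls) "//" = some (i + 1) := by rw [h, h2]; rfl
    rw [divideGbGo_eq_some _ _ h3, divideGbGo_eq_some _ _ h2,
        PySem.List.slice_from_natCast, PySem.List.slice_to_natCast,
        PySem.List.slice_from_natCast, PySem.List.slice_to_natCast]
    simp only [List.drop_succ_cons, List.take_succ_cons, List.nil_append]
    rw [divideGbGo_acc (ls.drop (i + 1)).length _ le_rfl [ls.take i],
        divideGbGo_acc (ls.drop (i + 1)).length _ le_rfl [l :: ls.take i]]
    simp [gHelp]

theorem foldA (ls : List String) (acc : List (List String)) (cur : List String) :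
    (ls.foldl
      (fun (s : List (List String) × List String) line =>
        if line == "//" then (s.1 ++ [s.2], [])
        else (s.1, s.2 ++ [line]))
      (acc, cur)).1 = acc ++ gHelp cur (divideGbGo ls []) := by
  induction ls generalizing acc cur with
  | nil => simp [divideGbGo_nil, gHelp]
  | cons l ls ih =>
    by_cases hl : l = "//"
    · subst hl
      simp only [List.foldl_cons, BEq.rfl, if_pos]
      rw [ih, divideGbGo_cons_hit, gHelp_nil]
      simp [gHelp]
    · have : (l == "//") = false := by simp [hl]
      simp only [List.foldl_cons, this, Bool.false_eq_true, if_neg, not_false_iff]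
      rw [ih, divideGbGo_cons_miss l ls hl, gHelp_comp]

-- ===== VERDICT (by name: the statement is the Claim_ definition above) =====
theorem divide_gb_spec : Claim_equal_divide_gb := by
  intro gb_lines _
  unfold Spec_divide_gb divide_gb divide_gb_alt
  rw [foldA, gHelp_nil, List.nil_append]
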